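-- pv_equiv track=rewrite | github.com/QueBallSharken/dtpe-canonical-runtime | core/policy/snapshot.py | _require_permitted_crypto_profiles
-- ===== SOURCE A (Python) =====
-- from typing import Any, Dict, List, Optional
--
-- def _require_permitted_crypto_profiles(value: Any) -> List[str]:
--     if not isinstance(value, list) or not value:
--         raise RuntimeError("Policy file must contain non-empty permitted_crypto_profiles")
--
--     normalized: List[str] = []
--     for item in value:
--         if not isinstance(item, str) or not item.strip():
--             raise RuntimeError(
--                 "Policy file permitted_crypto_profiles must contain only non-empty strings"
--             )
--         normalized.append(item)
--
--     if normalized != sorted(normalized):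
--         raise RuntimeError("Policy file permitted_crypto_profiles must be deterministically ordered")
--
--     return normalized
-- ===== SOURCE B (Python) =====
-- def _require_permitted_crypto_profiles(value):
--     if not isinstance(value, list) or not value:
--         raise RuntimeError("Policy file must contain non-empty permitted_crypto_profiles")
--
--     prev = None
--     for item in value:
--         if not isinstance(item, str) or not item.strip():
--             raise RuntimeError(
--                 "Policy file permitted_crypto_profiles must contain only non-empty strings"
--             )
--         if prev is not None and item < prev:
--             raise RuntimeError("Policy file permitted_crypto_profiles must be deterministically ordered")
--         prev = item
--     return list(value)
-- ===== Notes on version B (the rewrite author's own statement) =====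
-- stated objective: alternative
-- what changed: B makes a single validation pass that tracks the previous element and checks ordering against the current one, instead of building a normalized copy and comparing it with sorted(normalized) in a second pass; it trades the sort for an in-order adjacent scan at similar measured cost.
import Mathlib
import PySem

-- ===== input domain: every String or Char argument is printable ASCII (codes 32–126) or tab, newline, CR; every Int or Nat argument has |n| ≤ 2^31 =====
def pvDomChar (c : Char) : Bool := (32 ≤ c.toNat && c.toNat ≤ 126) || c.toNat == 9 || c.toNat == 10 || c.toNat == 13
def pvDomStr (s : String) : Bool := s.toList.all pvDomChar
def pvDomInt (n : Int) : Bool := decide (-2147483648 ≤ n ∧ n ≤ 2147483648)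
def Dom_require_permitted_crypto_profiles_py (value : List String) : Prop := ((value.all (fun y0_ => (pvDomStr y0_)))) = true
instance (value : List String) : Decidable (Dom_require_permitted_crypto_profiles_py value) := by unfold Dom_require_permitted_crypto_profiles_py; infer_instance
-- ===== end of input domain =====

-- B replaces A's build-then-`sorted`-compare with one linear pass that checks each item against the
-- previous one (no sort, one pass; similar measured cost). Equivalence is about the RETURN value; raising inputs are outside Pre_.

-- ===== PORT A =====
-- the validation loop of A: raises (none) on an item with empty strip, else appends to `normalized`
def pvALoop (l : List String) (acc : List String) : Option (List String) :=
  match l with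
  | [] => some acc
  | item :: rest =>
      if PySem.Str.strip item = "" then none
      else pvALoop rest (acc ++ [item])

def require_permitted_crypto_profiles_py (value : List String) : List String :=
  -- Python raises where this computes `none`; such inputs are excluded by Pre_, `[]` stands in
  (if value = [] then none
   else match pvALoop value [] with
        | none => none
        | some normalized =>
            if normalized ≠ PySem.List.sorted normalized (fun x => x) false then none
            else some normalized).getD []

-- ===== PORT B =====
-- B's single pass: `prev` is the previous item (none at the start); false = a RuntimeError in Python
def pvBLoop (l : List String) (prev : Option String) : Bool :=
  match l with
  | [] => true
  | item :: rest =>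
      if PySem.Str.strip item = "" then false
      else match prev with
           | some p => if item < p then false else pvBLoop rest (some item)
           | none => pvBLoop rest (some item)

def require_permitted_crypto_profiles_py_alt (value : List String) : List String :=
  if value = [] then []          -- Python raises here (outside Pre_)
  else if pvBLoop value none then value
  else []                        -- Python raises here (outside Pre_)

-- ===== PRECONDITION & SPEC =====
-- Pre_ = exactly the inputs where A returns: non-empty, every item non-blank, already sorted
def Pre_require_permitted_crypto_profiles_py (value : List String) : Prop :=
  value ≠ [] ∧ (∀ s ∈ value, PySem.Str.strip s ≠ "") ∧ value.Pairwise (fun a b => a.toList ≤ b.toList)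
instance (value : List String) : Decidable (Pre_require_permitted_crypto_profiles_py value) := by
  unfold Pre_require_permitted_crypto_profiles_py; infer_instance

def pvWitness_require_permitted_crypto_profiles_py : List String := ["aes", "chacha"]

def Spec_require_permitted_crypto_profiles_py (value : List String) (out : List String) : Prop := out = require_permitted_crypto_profiles_py_alt value
instance (value : List String) (out : List String) : Decidable (Spec_require_permitted_crypto_profiles_py value out) := by unfold Spec_require_permitted_crypto_profiles_py; infer_instance

-- ===== CLAIM (what is proved, stated in full; the proofs are below) =====
def Claim_equal_require_permitted_crypto_profiles_py : Prop := ∀ (value : List String), Dom_require_permitted_crypto_profiles_py value → Pre_require_permitted_crypto_profiles_py value → Spec_require_permitted_crypto_profiles_py value (require_permitted_crypto_profiles_py value)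

-- ===== LEMMAS AND PROOFS =====

-- A's loop succeeds and returns acc ++ l when every item is non-blank
theorem pvALoop_ok (l : List String) (acc : List String)
    (h : ∀ s ∈ l, PySem.Str.strip s ≠ "") : pvALoop l acc = some (acc ++ l) := by
  induction l generalizing acc with
  | nil => simp [pvALoop]
  | cons x xs ih =>
      have hx := h x (by simp)
      simp only [pvALoop, if_neg hx]
      rw [ih _ (fun s hs => h s (by simp [hs]))]
      simp

-- B's loop succeeds when items are non-blank, the list is sorted, and prev is below the head
theorem pvBLoop_ok (l : List String) (prev : Option String)
    (h : ∀ s ∈ l, PySem.Str.strip s ≠ "") (hs : l.Pairwise (· ≤ ·))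
    (hp : ∀ p, prev = some p → ∀ x ∈ l.head?, p ≤ x) : pvBLoop l prev = true := by
  induction l generalizing prev with
  | nil => simp [pvBLoop]
  | cons x xs ih =>
      have hx := h x (by simp)
      simp only [pvBLoop, if_neg hx]
      have hrec : pvBLoop xs (some x) = true := by
        apply ih (some x) (fun s hs' => h s (List.mem_cons_of_mem _ hs')) hs.tail
        intro p hp' y hy
        cases hp' 
        rcases xs with _ | ⟨z, zs⟩
        · simp at hy
        · simp at hy; subst hy; exact (List.pairwise_cons.mp hs).1 z (by simp)
      cases prev with
      | none => exact hrec
      | some p =>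
          have hle : p ≤ x := hp p rfl x (by simp)
          simp [not_lt.mpr hle, hrec]

-- ===== VERDICT (by name: the statement is the Claim_ definition above) =====
theorem require_permitted_crypto_profiles_py_spec : Claim_equal_require_permitted_crypto_profiles_py := by
  intro value _ hpre
  obtain ⟨hne, hblank, hsorted'⟩ := hpre
  have hsorted : value.Pairwise (· ≤ ·) :=
    hsorted'.imp (fun h => String.le_iff_toList_le.mpr h)
  unfold Spec_require_permitted_crypto_profiles_py
  unfold require_permitted_crypto_profiles_py require_permitted_crypto_profiles_py_alt
  rw [pvALoop_ok value [] hblank]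
  rw [pvBLoop_ok value none hblank hsorted (by intro p hp; cases hp)]
  have hsortedEq : PySem.List.sorted value (fun x => x) false = value :=
    PySem.List.sorted_eq_self_of_pairwise value (fun x => x) hsorted
  simp [hne, hsortedEq]
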